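-- pv_equiv track=rewrite | github.com/Pack3tL0ss/central-api-cli | centralcli/clibatch.py | _extract_uplink_commands
-- ===== SOURCE A (Python) =====
-- from typing import Dict, List, Tuple, Union
--
-- def _extract_uplink_commands(commands: List[str]) -> Tuple[List[str], List[str]]:
--     _start=None
--     uplk_cmds = []
--     for idx, c in enumerate(commands):
--         if c.lower().startswith("uplink wired"):
--             _start = idx
--         elif _start and c.lstrip().startswith("!"):
--             uplk_cmds += [slice(_start, idx + 1)]
--             _start = None
--     uplk_lines = [line for x in [commands[s] for s in uplk_cmds] for line in x]
--     idx_list = [x for idx in [list(range(s.start, s.stop)) for s in uplk_cmds] for x in idx]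
--     non_uplk_lines = [cmd for idx, cmd in enumerate(commands) if idx not in idx_list]
--     return uplk_lines, non_uplk_lines
-- ===== SOURCE B (Python) =====
-- from typing import List, Tuple
--
-- def _extract_uplink_commands(commands: List[str]) -> Tuple[List[str], List[str]]:
--     uplk_lines = []
--     non_uplk_lines = []
--     pending = []
--     _start = None
--     for idx, c in enumerate(commands):
--         if c.lower().startswith("uplink wired"):
--             non_uplk_lines += pending
--             pending = [c]
--             _start = idx
--         elif _start and c.lstrip().startswith("!"):
--             pending.append(c)
--             uplk_lines += pending
--             pending = []
--             _start = None
--         else: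
--             pending.append(c)
--     non_uplk_lines += pending
--     return uplk_lines, non_uplk_lines
-- ===== Notes on version B (the rewrite author's own statement) =====
-- stated objective: simpler
-- what changed: Replaced A's three-pass pipeline (collect slice objects, concatenate the slices, then filter every line through an `idx not in idx_list` membership scan) with a single pass over enumerate(commands) that keeps a pending buffer and routes each flushed block directly to the uplink or non-uplink list.
import Mathlib
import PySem

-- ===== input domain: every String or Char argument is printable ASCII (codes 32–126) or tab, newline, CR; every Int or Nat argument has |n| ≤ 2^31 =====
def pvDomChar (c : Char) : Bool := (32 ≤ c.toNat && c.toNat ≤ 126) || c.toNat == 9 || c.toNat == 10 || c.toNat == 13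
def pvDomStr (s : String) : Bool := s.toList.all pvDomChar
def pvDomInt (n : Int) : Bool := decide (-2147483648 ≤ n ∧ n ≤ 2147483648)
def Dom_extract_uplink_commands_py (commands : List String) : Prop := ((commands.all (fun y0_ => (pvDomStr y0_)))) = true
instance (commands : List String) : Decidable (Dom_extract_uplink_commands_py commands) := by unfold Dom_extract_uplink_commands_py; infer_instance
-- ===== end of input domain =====

-- B replaces A's three-pass pipeline (collect slice objects, concatenate the slices, filter by index
-- membership) with one pass over the commands that classifies lines via a pending buffer; objective: simpler.

-- ===== PORT A =====
-- shared line predicates: c.lower().startswith("uplink wired") and c.lstrip().startswith("!")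
def pvIsUp (c : String) : Bool := PySem.Str.startswith (PySem.Str.lower c) "uplink wired"
def pvIsBang (c : String) : Bool := PySem.Str.startswith (PySem.Str.lstrip c) "!"
-- Python truthiness of `_start` (None or the int idx): `_start and …`
def pvTruthy (o : Option Nat) : Bool := match o with | some s => decide (s ≠ 0) | none => false

-- the for-loop of A: builds the list of slice objects (start, stop) in `acc`
def pvLoopA : List String → Nat → Option Nat → List (Nat × Nat) → List (Nat × Nat)
  | [], _, _, acc => acc
  | c :: rest, idx, start, acc =>
    if pvIsUp c then pvLoopA rest (idx + 1) (some idx) acc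
    else if pvTruthy start && pvIsBang c then
      pvLoopA rest (idx + 1) none (acc ++ [(start.getD 0, idx + 1)])
    else pvLoopA rest (idx + 1) start acc

def extract_uplink_commands_py (commands : List String) : List String × List String :=
  let uplk_cmds := pvLoopA commands 0 none []
  let uplk_lines :=
    ((uplk_cmds.map (fun s => PySem.List.slice commands (some (s.1 : Int)) (some (s.2 : Int)))).flatten)
  let idx_list :=
    ((uplk_cmds.map (fun s => PySem.List.pyRange (s.1 : Int) (s.2 : Int) 1)).flatten)
  let non_uplk_lines :=
    ((PySem.List.enumerate commands 0).filter (fun ic => !decide (ic.1 ∈ idx_list))).map (·.2)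
  (uplk_lines, non_uplk_lines)

-- ===== PORT B =====
-- single pass with a pending buffer and the two output accumulators
def pvLoopB : List String → Nat → Option Nat → List String → List String → List String →
    List String × List String
  | [], _, _, pending, uplk, non => (uplk, non ++ pending)
  | c :: rest, idx, start, pending, uplk, non =>
    if pvIsUp c then pvLoopB rest (idx + 1) (some idx) [c] uplk (non ++ pending)
    else if pvTruthy start && pvIsBang c then
      pvLoopB rest (idx + 1) none [] (uplk ++ pending ++ [c]) non
    else pvLoopB rest (idx + 1) start (pending ++ [c]) uplk non

def extract_uplink_commands_py_alt (commands : List String) : List String × List String :=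
  pvLoopB commands 0 none [] [] []

-- ===== PRECONDITION & SPEC =====
def Spec_extract_uplink_commands_py (commands : List String) (out : List String × List String) : Prop := out = extract_uplink_commands_py_alt commands
instance (commands : List String) (out : List String × List String) : Decidable (Spec_extract_uplink_commands_py commands out) := by unfold Spec_extract_uplink_commands_py; infer_instance

-- ===== CLAIM (what is proved, stated in full; the proofs are below) =====
def Claim_equal_extract_uplink_commands_py : Prop := ∀ (commands : List String), Dom_extract_uplink_commands_py commands → Spec_extract_uplink_commands_py commands (extract_uplink_commands_py commands)

-- ===== LEMMAS AND PROOFS =====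

-- proof-only helpers
-- acc-free form of B's loop
def pvM : List String → Nat → Option Nat → List String → List String × List String
  | [], _, _, pending => ([], pending)
  | c :: rest, idx, start, pending =>
    if pvIsUp c then
      let r := pvM rest (idx + 1) (some idx) [c]
      (r.1, pending ++ r.2)
    else if pvTruthy start && pvIsBang c then
      let r := pvM rest (idx + 1) none []
      (pending ++ [c] ++ r.1, r.2)
    else pvM rest (idx + 1) start (pending ++ [c])

def pvCov (S : List (Nat × Nat)) (i : Nat) : Bool :=
  S.any (fun se => decide (se.1 ≤ i) && decide (i < se.2))

def pvNonCov : List String → Nat → List (Nat × Nat) → List String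
  | [], _, _ => []
  | c :: l, i, S => if pvCov S i then pvNonCov l (i + 1) S else c :: pvNonCov l (i + 1) S

def pvUplkOf (full : List String) (S : List (Nat × Nat)) : List String :=
  S.flatMap (fun se => PySem.List.slice full (some (se.1 : Int)) (some (se.2 : Int)))

def pvIdxList (S : List (Nat × Nat)) : List Int :=
  (S.map (fun se => PySem.List.pyRange (se.1 : Int) (se.2 : Int) 1)).flatten

def pvRHS (full l : List String) (idx : Nat) (p : List String) :
    List (Nat × Nat) → List String × List String
  | [] => ([], p ++ pvNonCov l idx [])
  | (s, e) :: S' =>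
    if s < idx then
      (p ++ PySem.List.slice full (some (idx : Int)) (some (e : Int)) ++ pvUplkOf full S',
       pvNonCov l idx ((s, e) :: S'))
    else (pvUplkOf full ((s, e) :: S'), p ++ pvNonCov l idx ((s, e) :: S'))

lemma pvLoopA_acc (l : List String) : ∀ (idx : Nat) (st : Option Nat) (acc : List (Nat × Nat)),
    pvLoopA l idx st acc = acc ++ pvLoopA l idx st [] := by
  induction l with
  | nil => intro idx st acc; simp [pvLoopA]
  | cons c rest ih =>
    intro idx st acc
    simp only [pvLoopA]
    split
    · exact ih _ _ _
    · split
      · rw [ih (idx + 1) none (acc ++ [(st.getD 0, idx + 1)]),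
            ih (idx + 1) none ([] ++ [(st.getD 0, idx + 1)])]
        simp
      · exact ih _ _ _

lemma pvLoopB_eq_pvM (l : List String) : ∀ (idx : Nat) (st : Option Nat) (p u n : List String),
    pvLoopB l idx st p u n = (u ++ (pvM l idx st p).1, n ++ (pvM l idx st p).2) := by
  induction l with
  | nil => intro idx st p u n; simp [pvLoopB, pvM]
  | cons c rest ih =>
    intro idx st p u n
    simp only [pvLoopB, pvM]
    split
    · rw [ih]; simp
    · split
      · rw [ih]; simp
      · exact ih _ _ _ _ _

lemma pvNonCov_nil (l : List String) : ∀ i, pvNonCov l i [] = l := by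
  induction l with
  | nil => intro i; simp [pvNonCov]
  | cons c rest ih => intro i; simp [pvNonCov, pvCov, ih]

lemma pvNonCov_drop_head (l : List String) : ∀ (i s e : Nat) (S : List (Nat × Nat)), e ≤ i →
    pvNonCov l i ((s, e) :: S) = pvNonCov l i S := by
  induction l with
  | nil => intro i s e S h; simp [pvNonCov]
  | cons c rest ih =>
    intro i s e S h
    have hcov : pvCov ((s, e) :: S) i = pvCov S i := by
      simp [pvCov]; omega
    simp only [pvNonCov, hcov]
    rw [ih (i + 1) s e S (by omega)]

lemma pvRHS_of_ge (full l : List String) (idx : Nat) (p : List String)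
    (S : List (Nat × Nat)) (h : ∀ se ∈ S, idx ≤ se.1) :
    pvRHS full l idx p S = (pvUplkOf full S, p ++ pvNonCov l idx S) := by
  cases S with
  | nil => simp [pvRHS, pvUplkOf, pvNonCov_nil]
  | cons se S' =>
    obtain ⟨s, e⟩ := se
    have : ¬ s < idx := by have := h (s, e) (by simp); omega
    simp [pvRHS, this]

-- structure of A's slice list: either every slice starts at ≥ idx, or the head slice is the
-- inherited open block (truthy start) and the rest start at ≥ idx
lemma pvA1_structure (l : List String) : ∀ (idx : Nat) (st : Option Nat),
    (∀ se ∈ pvLoopA l idx st [], idx ≤ se.1 ∧ idx < se.2) ∨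
    (∃ s e S', st = some s ∧ s ≠ 0 ∧ pvLoopA l idx st [] = (s, e) :: S' ∧ idx < e ∧
      ∀ se ∈ S', idx ≤ se.1 ∧ idx < se.2) := by
  induction l with
  | nil => intro idx st; left; simp [pvLoopA]
  | cons c rest ih =>
    intro idx st
    simp only [pvLoopA]
    split
    · rcases ih (idx + 1) (some idx) with h | ⟨s, e, S', hst, hs0, hEq, he, hS'⟩
      · left; intro se hse; have := h se hse; omega
      · left
        rw [hEq]
        intro se hse
        rcases List.mem_cons.mp hse with h | h
        · subst h; have hsi := Option.some.inj hst; simp; omega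
        · have := hS' se h; omega
    · split
      · rename_i hnup htr
        obtain ⟨s, hs⟩ : ∃ s, st = some s := by
          cases st with
          | none => simp [pvTruthy] at htr
          | some s => exact ⟨s, rfl⟩
        have hs0 : s ≠ 0 := by
          subst hs; simp [pvTruthy] at htr; exact htr.1
        right
        refine ⟨s, idx + 1, pvLoopA rest (idx + 1) none [], hs, hs0, ?_, by omega, ?_⟩
        · rw [pvLoopA_acc]; subst hs; simp
        · intro se hse
          rcases ih (idx + 1) none with h | ⟨s', e', S', hst, _, _, _, _⟩
          · have := h se hse; omega
          · exact absurd hst (by simp)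
      · rcases ih (idx + 1) st with h | ⟨s, e, S', hst, hs0, hEq, he, hS'⟩
        · left; intro se hse; have := h se hse; omega
        · right; exact ⟨s, e, S', hst, hs0, hEq, by omega,
            fun se hse => by have := hS' se hse; omega⟩

lemma pvSlice_cons (full rest : List String) (c : String) (idx e : Nat)
    (hd : full.drop idx = c :: rest) (he : idx < e) :
    PySem.List.slice full (some (idx : Int)) (some (e : Int)) =
      c :: PySem.List.slice full (some ((idx + 1 : Nat) : Int)) (some (e : Int)) := by
  rw [PySem.List.slice_natCast, PySem.List.slice_natCast, hd]
  have h1 : full.drop (idx + 1) = rest := by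
    have h := List.drop_drop (i := 1) (j := idx) (l := full)
    rw [hd] at h
    simpa using h.symm
  rw [h1]
  have : e - idx = (e - (idx + 1)) + 1 := by omega
  rw [this, List.take_succ_cons]

-- the main induction: B's single pass computes A's (slices → concat, filter) pipeline
lemma pvMain (l : List String) : ∀ (full : List String) (idx : Nat) (st : Option Nat) (p : List String),
    full.drop idx = l →
    (∀ s, st = some s → s < idx ∧ p = (full.take idx).drop s) →
    pvM l idx st p = pvRHS full l idx p (pvLoopA l idx st []) := by
  induction l with
  | nil => intro full idx st p _ _; simp [pvM, pvLoopA, pvRHS, pvNonCov]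
  | cons c rest ih =>
    intro full idx st p hdrop hinv
    have hlen : idx < full.length := by
      by_contra h
      rw [List.drop_eq_nil_of_le (by omega)] at hdrop
      exact List.cons_ne_nil _ _ hdrop.symm
    have hdrop1 : full.drop (idx + 1) = rest := by
      have h := List.drop_drop (i := 1) (j := idx) (l := full)
      rw [hdrop] at h
      simpa using h.symm
    have hget : full[idx]? = some c := by
      conv_lhs => rw [← List.take_append_drop idx full, hdrop]
      rw [List.getElem?_append_right (by simp)]
      simp [List.length_take, Nat.min_eq_left (le_of_lt hlen)]
    have htake1 : full.take (idx + 1) = full.take idx ++ [c] := by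
      rw [List.take_add_one, hget]; rfl
    simp only [pvM, pvLoopA]
    split
    · -- uplink line
      have hinv' : ∀ s, some idx = some s → s < idx + 1 ∧ [c] = (full.take (idx + 1)).drop s := by
        intro s hs
        have : s = idx := (Option.some.inj hs).symm
        subst this
        constructor
        · omega
        · rw [htake1, List.drop_append_of_le_length (by simp; omega)]
          simp [List.drop_eq_nil_of_le]
      rw [ih full (idx + 1) (some idx) [c] hdrop1 hinv']
      rcases pvA1_structure rest (idx + 1) (some idx) with h | ⟨s, e, S', hst, hs0, hEq, he, hS'⟩
      · -- no inherited close: nothing captured at idx+1, nor at idx (all starts ≥ idx+1)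
        rw [pvRHS_of_ge _ _ _ _ _ (fun se hse => (h se hse).1),
            pvRHS_of_ge _ _ _ _ _ (fun se hse => by have := h se hse; omega)]
        have hcov : pvCov (pvLoopA rest (idx + 1) (some idx) []) idx = false := by
          simp only [pvCov, List.any_eq_false]
          intro se hse
          have := h se hse
          simp; omega
        simp [pvNonCov, hcov]
      · -- head slice is (idx, e): the block opened here does close
        have hs : s = idx := (Option.some.inj hst).symm
        rw [hEq]
        simp only [pvRHS, if_pos (show s < idx + 1 by omega), if_neg (show ¬ s < idx by omega)]
        have hslice := pvSlice_cons full rest c idx e hdrop (by omega)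
        have hcov : pvCov ((idx, e) :: S') idx = true := by simp [pvCov]; omega
        simp only [pvNonCov, hs, hcov, if_pos, pvUplkOf, List.flatMap_cons, hslice]
        simp
    · split
      · -- closing '!' line
        rename_i hnup htr
        obtain ⟨s, hs⟩ : ∃ s, st = some s := by
          cases st with
          | none => simp [pvTruthy] at htr
          | some s => exact ⟨s, rfl⟩
        obtain ⟨hslt, hp⟩ := hinv s hs
        rw [ih full (idx + 1) none [] hdrop1 (by simp)]
        have hge : ∀ se ∈ pvLoopA rest (idx + 1) none [], idx + 1 ≤ se.1 := by
          rcases pvA1_structure rest (idx + 1) none with h | ⟨s', e', S', hst, _⟩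
          · exact fun se hse => (h se hse).1
          · exact absurd hst (by simp)
        rw [pvRHS_of_ge _ _ _ _ _ hge]
        have hacc : pvLoopA rest (idx + 1) none ([] ++ [(st.getD 0, idx + 1)]) =
            (s, idx + 1) :: pvLoopA rest (idx + 1) none [] := by
          rw [pvLoopA_acc rest (idx + 1) none ([] ++ [(st.getD 0, idx + 1)])]
          simp [hs]
        rw [hacc]
        simp only [pvRHS]
        rw [if_pos hslt]
        have hsl : PySem.List.slice full (some (idx : Int)) (some ((idx + 1 : Nat) : Int)) = [c] := by
          rw [PySem.List.slice_natCast, hdrop]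
          have h1 : idx + 1 - idx = 1 := by omega
          rw [h1]; rfl
        have hcov : pvCov ((s, idx + 1) :: pvLoopA rest (idx + 1) none []) idx = true := by
          simp [pvCov]; omega
        simp only [pvNonCov, hcov, if_pos]
        rw [pvNonCov_drop_head rest (idx + 1) s (idx + 1) _ (by omega)]
        simp only [pvUplkOf]
        rw [hsl]
        simp
      · -- ordinary line
        have hinv' : ∀ s, st = some s → s < idx + 1 ∧ p ++ [c] = (full.take (idx + 1)).drop s := by
          intro s hs
          obtain ⟨h1, h2⟩ := hinv s hs
          refine ⟨by omega, ?_⟩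
          rw [htake1, List.drop_append_of_le_length (by simp; omega), ← h2]
        rw [ih full (idx + 1) st (p ++ [c]) hdrop1 hinv']
        rcases pvA1_structure rest (idx + 1) st with h | ⟨s, e, S', hst, hs0, hEq, he, hS'⟩
        · rw [pvRHS_of_ge _ _ _ _ _ (fun se hse => (h se hse).1),
              pvRHS_of_ge _ _ _ _ _ (fun se hse => by have := h se hse; omega)]
          have hcov : pvCov (pvLoopA rest (idx + 1) st []) idx = false := by
            simp only [pvCov, List.any_eq_false]
            intro se hse
            have := h se hse
            simp; omega
          simp [pvNonCov, hcov]
        · obtain ⟨hslt, hp⟩ := hinv s hst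
          rw [hEq]
          simp only [pvRHS, if_pos (show s < idx + 1 by omega), if_pos hslt]
          have hslice := pvSlice_cons full rest c idx e hdrop (by omega)
          have hcov : pvCov ((s, e) :: S') idx = true := by simp [pvCov]; omega
          simp only [pvNonCov, hcov, if_pos, hslice]
          simp

lemma pv_mem_idxList (S : List (Nat × Nat)) (i : Nat) :
    decide ((i : Int) ∈ pvIdxList S) = pvCov S i := by
  simp only [pvIdxList, pvCov]
  rcases h : S.any (fun se => decide (se.1 ≤ i) && decide (i < se.2)) with _ | _
  · simp only [List.any_eq_false] at h
    simp only [decide_eq_false_iff_not, List.mem_flatten, List.mem_map]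
    rintro ⟨l, ⟨se, hse, rfl⟩, hmem⟩
    rw [PySem.List.mem_pyRange_one] at hmem
    have := h se hse
    simp at this
    omega
  · simp only [List.any_eq_true] at h
    obtain ⟨se, hse, hcond⟩ := h
    simp only [decide_eq_true_eq, List.mem_flatten, List.mem_map]
    refine ⟨_, ⟨se, hse, rfl⟩, ?_⟩
    rw [PySem.List.mem_pyRange_one]
    simp at hcond
    omega

lemma pvFilter_enum (l : List String) : ∀ (i : Nat) (S : List (Nat × Nat)),
    ((PySem.List.enumerate l (i : Int)).filter
        (fun ic => !decide (ic.1 ∈ pvIdxList S))).map (·.2) = pvNonCov l i S := by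
  induction l with
  | nil => intro i S; simp [PySem.List.enumerate_nil, pvNonCov]
  | cons c rest ih =>
    intro i S
    rw [PySem.List.enumerate_cons, List.filter_cons]
    have hcast : (i : Int) + 1 = ((i + 1 : Nat) : Int) := by push_cast; ring
    rcases hcov : pvCov S i with _ | _
    · have h1 : (!decide ((i : Int) ∈ pvIdxList S)) = true := by
        rw [pv_mem_idxList, hcov]; rfl
      rw [h1, if_pos rfl, List.map_cons, hcast, ih]
      simp [pvNonCov, hcov]
    · have h1 : (!decide ((i : Int) ∈ pvIdxList S)) = false := by
        rw [pv_mem_idxList, hcov]; rfl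
      rw [h1, if_neg (by simp), hcast, ih]
      simp [pvNonCov, hcov]

-- ===== VERDICT (by name: the statement is the Claim_ definition above) =====
theorem extract_uplink_commands_py_spec : Claim_equal_extract_uplink_commands_py := by
  intro commands _
  unfold Spec_extract_uplink_commands_py extract_uplink_commands_py extract_uplink_commands_py_alt
  rw [pvLoopB_eq_pvM]
  rw [pvMain commands commands 0 none [] (by simp) (by simp)]
  rw [pvRHS_of_ge _ _ _ _ _ (fun se _ => Nat.zero_le _)]
  have hnon := pvFilter_enum commands 0 (pvLoopA commands 0 none [])
  simp only [Nat.cast_zero, pvIdxList] at hnon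
  refine Prod.ext ?_ ?_
  · simp [pvUplkOf, List.flatMap_def]
  · exact hnon
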